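-- pv_equiv track=rewrite | github.com/Kudarty/openclaw-AiToms | scripts/rennerveit.py | detect_cause
-- ===== SOURCE A (Python) =====
-- CAUSES = {
--     "rate_limit":     ["429", "rate_limit", "Extra usage"],
--     "secrets":        ["SecretRefResolutionError", "missing or empty", "secrets unavailable", "required secrets"],
--     "token_mismatch": ["token mismatch", "unauthorized: gateway"],
--     "crash_loop":     ["Gateway failed to start", "Startup failed"],
--     "session_bloat":  ["2.1M", "2.3M", "long context", "context request"],
--     "network":        ["ETIMEDOUT", "ENETUNREACH", "fetch fallback"],
--     "telegram":       ["botToken: unresolved", "telegram.*error"],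
-- }
--
-- def detect_cause(events, start=None, end=None):
--     """Определяет причину сбоя по ключевым словам в логах."""
--     relevant = [e for e in events
--                 if (start is None or e["time"] >= start)
--                 and (end is None or e["time"] <= end)]
--
--     all_text = " ".join([e["msg"] for e in relevant]).lower()
--
--     detected = []
--     for cause, keywords in CAUSES.items():
--         for kw in keywords:
--             if kw.lower() in all_text:
--                 detected.append(cause)
--                 break
--
--     if not detected:
--         return "unknown"
--
--     # Приоритет причин
--     priority = ["crash_loop", "secrets", "token_mismatch", "rate_limit",
--                 "session_bloat", "telegram", "network"]
--     for p in priority: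
--         if p in detected:
--             return p
--     return detected[0]
-- ===== SOURCE B (Python) =====
-- _PRIORITY = [
--     ("crash_loop",     ["Gateway failed to start", "Startup failed"]),
--     ("secrets",        ["SecretRefResolutionError", "missing or empty", "secrets unavailable", "required secrets"]),
--     ("token_mismatch", ["token mismatch", "unauthorized: gateway"]),
--     ("rate_limit",     ["429", "rate_limit", "Extra usage"]),
--     ("session_bloat",  ["2.1M", "2.3M", "long context", "context request"]),
--     ("telegram",       ["botToken: unresolved", "telegram.*error"]),
--     ("network",        ["ETIMEDOUT", "ENETUNREACH", "fetch fallback"]),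
-- ]
--
-- def detect_cause(events, start=None, end=None):
--     """Single priority-ordered scan: first cause with a matching keyword wins."""
--     relevant = [e for e in events
--                 if (start is None or e["time"] >= start)
--                 and (end is None or e["time"] <= end)]
--     all_text = " ".join(e["msg"] for e in relevant).lower()
--     for cause, keywords in _PRIORITY:
--         if any(kw.lower() in all_text for kw in keywords):
--             return cause
--     return "unknown"
-- ===== Notes on version B (the rewrite author's own statement) =====
-- stated objective: simpler
-- what changed: Replaces the two-phase detect-then-rank structure (build a 'detected' list over CAUSES, then scan a priority list for membership, with an unreachable detected[0] fallback) by a single scan over one priority-ordered cause/keyword table that returns the first cause with a keyword hit, or 'unknown'.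
import Mathlib
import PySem

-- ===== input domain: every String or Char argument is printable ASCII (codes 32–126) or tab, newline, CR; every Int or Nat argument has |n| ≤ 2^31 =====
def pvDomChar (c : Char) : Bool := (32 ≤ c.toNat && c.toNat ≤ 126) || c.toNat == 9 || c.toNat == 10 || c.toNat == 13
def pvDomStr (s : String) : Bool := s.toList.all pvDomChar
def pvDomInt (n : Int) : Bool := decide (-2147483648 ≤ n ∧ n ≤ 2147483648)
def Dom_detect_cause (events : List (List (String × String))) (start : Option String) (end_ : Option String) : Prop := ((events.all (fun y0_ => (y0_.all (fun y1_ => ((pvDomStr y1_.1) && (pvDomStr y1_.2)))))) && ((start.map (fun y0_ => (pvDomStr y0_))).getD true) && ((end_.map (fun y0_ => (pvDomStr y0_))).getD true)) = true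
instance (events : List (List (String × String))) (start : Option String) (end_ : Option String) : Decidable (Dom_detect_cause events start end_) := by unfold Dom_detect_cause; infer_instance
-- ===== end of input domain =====

-- B replaces A's two-phase detect-then-rank (build a 'detected' list over CAUSES, then scan a
-- priority list) by a single scan of one priority-ordered cause/keyword table: simpler, same cost.


-- ===== SHARED HELPERS (the relevant-filter + all_text lines are textually identical in A and B) =====
-- dict lookup e[k] (first match; none = KeyError, excluded by Pre_)
def pvGetS (e : List (String × String)) (k : String) : Option String :=
  (e.find? (fun p => p.1 == k)).map (fun p => p.2)

-- (start is None or e["time"] >= start) and (end is None or e["time"] <= end); Python str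
-- comparison is code-point lexicographic = Lean's order on toList
def pvRelevant (start end_ : Option String) (e : List (String × String)) : Bool :=
  (match start with
   | none => true
   | some s => decide (s.toList ≤ ((pvGetS e "time").getD "").toList)) &&
  (match end_ with
   | none => true
   | some t => decide (((pvGetS e "time").getD "").toList ≤ t.toList))

-- all_text = " ".join([e["msg"] for e in relevant]).lower()
def pvAllText (events : List (List (String × String))) (start : Option String) (end_ : Option String) : String :=
  PySem.Str.lower (PySem.Str.join " " ((events.filter (pvRelevant start end_)).map (fun e => (pvGetS e "msg").getD "")))

-- for kw in keywords: if kw.lower() in all_text: … break  ⇔  any keyword (lowered) is in all_text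
def pvHit (t : String) (kws : List String) : Bool :=
  kws.any (fun kw => PySem.Str.isIn (PySem.Str.lower kw) t)

-- ===== PORT A =====
def pvCAUSES : List (String × List String) :=
  [("rate_limit",     ["429", "rate_limit", "Extra usage"]),
   ("secrets",        ["SecretRefResolutionError", "missing or empty", "secrets unavailable", "required secrets"]),
   ("token_mismatch", ["token mismatch", "unauthorized: gateway"]),
   ("crash_loop",     ["Gateway failed to start", "Startup failed"]),
   ("session_bloat",  ["2.1M", "2.3M", "long context", "context request"]),
   ("network",        ["ETIMEDOUT", "ENETUNREACH", "fetch fallback"]),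
   ("telegram",       ["botToken: unresolved", "telegram.*error"])]

def pvPriority : List String :=
  ["crash_loop", "secrets", "token_mismatch", "rate_limit", "session_bloat", "telegram", "network"]

-- the detect-then-rank tail of A, as a function of all_text
def pvRankA (t : String) : String :=
  let detected := pvCAUSES.foldl (fun acc ck => if pvHit t ck.2 then acc ++ [ck.1] else acc) []
  if detected.isEmpty then "unknown"
  else
    match pvPriority.find? (fun p => detected.contains p) with
    | some p => p
    | none => detected.headD ""   -- return detected[0] (guarded: detected nonempty here)

def detect_cause (events : List (List (String × String))) (start : Option String) (end_ : Option String) : String :=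
  pvRankA (pvAllText events start end_)

-- ===== PORT B =====
def pvPRIORITY_KW : List (String × List String) :=
  [("crash_loop",     ["Gateway failed to start", "Startup failed"]),
   ("secrets",        ["SecretRefResolutionError", "missing or empty", "secrets unavailable", "required secrets"]),
   ("token_mismatch", ["token mismatch", "unauthorized: gateway"]),
   ("rate_limit",     ["429", "rate_limit", "Extra usage"]),
   ("session_bloat",  ["2.1M", "2.3M", "long context", "context request"]),
   ("telegram",       ["botToken: unresolved", "telegram.*error"]),
   ("network",        ["ETIMEDOUT", "ENETUNREACH", "fetch fallback"])]

-- for cause, keywords in _PRIORITY: if any(kw.lower() in all_text …): return cause;  return "unknown"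
def pvScanB (table : List (String × List String)) (t : String) : String :=
  match table with
  | [] => "unknown"
  | ck :: rest => if pvHit t ck.2 then ck.1 else pvScanB rest t

def detect_cause_alt (events : List (List (String × String))) (start : Option String) (end_ : Option String) : String :=
  pvScanB pvPRIORITY_KW (pvAllText events start end_)

-- ===== PRECONDITION & SPEC =====
-- Pre_ excludes exactly the inputs on which Python A raises KeyError: an event without a "time"
-- key while start or end is given, or a relevant event without a "msg" key.
def Pre_detect_cause (events : List (List (String × String))) (start : Option String) (end_ : Option String) : Prop :=
  (∀ e ∈ events, (start.isSome ∨ end_.isSome) → (pvGetS e "time").isSome) ∧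
  (∀ e ∈ events, pvRelevant start end_ e = true → (pvGetS e "msg").isSome)
instance (events : List (List (String × String))) (start : Option String) (end_ : Option String) : Decidable (Pre_detect_cause events start end_) := by unfold Pre_detect_cause; infer_instance

def pvWitness_detect_cause : (List (List (String × String))) × Option String × Option String :=
  ([[("time", "2"), ("msg", "429 seen")], [("time", "5"), ("msg", "ok")]], some "1", none)

def Spec_detect_cause (events : List (List (String × String))) (start : Option String) (end_ : Option String) (out : String) : Prop := out = detect_cause_alt events start end_
instance (events : List (List (String × String))) (start : Option String) (end_ : Option String) (out : String) : Decidable (Spec_detect_cause events start end_ out) := by unfold Spec_detect_cause; infer_instance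

-- ===== CLAIM (what is proved, stated in full; the proofs are below) =====
def Claim_equal_detect_cause : Prop := ∀ (events : List (List (String × String))) (start : Option String) (end_ : Option String), Dom_detect_cause events start end_ → Pre_detect_cause events start end_ → Spec_detect_cause events start end_ (detect_cause events start end_)

-- ===== LEMMAS AND PROOFS =====

-- The heart of the equivalence: on any text, A's detect-then-rank equals B's single priority scan.
theorem pvRankA_eq_pvScanB (t : String) : pvRankA t = pvScanB pvPRIORITY_KW t := by
  cases h1 : pvHit t ["429", "rate_limit", "Extra usage"] <;>
  cases h2 : pvHit t ["SecretRefResolutionError", "missing or empty", "secrets unavailable", "required secrets"] <;>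
  cases h3 : pvHit t ["token mismatch", "unauthorized: gateway"] <;>
  cases h4 : pvHit t ["Gateway failed to start", "Startup failed"] <;>
  cases h5 : pvHit t ["2.1M", "2.3M", "long context", "context request"] <;>
  cases h6 : pvHit t ["ETIMEDOUT", "ENETUNREACH", "fetch fallback"] <;>
  cases h7 : pvHit t ["botToken: unresolved", "telegram.*error"] <;>
  simp [pvRankA, pvScanB, pvCAUSES, pvPRIORITY_KW, pvPriority, h1, h2, h3, h4, h5, h6, h7]

-- ===== VERDICT (by name: the statement is the Claim_ definition above) =====
theorem detect_cause_spec : Claim_equal_detect_cause := by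
  intro events start end_ _ _
  unfold Spec_detect_cause detect_cause detect_cause_alt
  exact pvRankA_eq_pvScanB (pvAllText events start end_)
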